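-- pv_equiv track=rewrite | github.com/LioBuitrago/Bioinformatica | punto 3-3.py | PuntuacionLP
-- ===== SOURCE A (Python) =====
-- Letras = ['G', 'A', 'S', 'P', 'V', 'T', 'C', 'I', 'L', 'N', 'D', 'K', 'Q', 'E', 'M', 'H', 'F', 'R', 'Y', 'W']
--
-- Masas_AA = {'G': 57, 'A': 71, 'S': 87, 'P': 97, 'V': 99, 'T': 101, 'C': 103, 'I': 113, 'L': 113, 'N': 114, 'D': 115, 'K': 128, 'Q': 128, 'E': 129, 'M': 131, 'H': 137, 'F': 147, 'R': 156, 'Y': 163, 'W': 186}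
--
-- def EspectroLineal(Peptido):
--     Prefijo_M = {}
--     Prefijo_M[0] = 0
--
--     for i in range(len(Peptido)):
--         for letras in Letras:
--             if letras==Peptido[i]:
--                 Prefijo_M[i+1] = Prefijo_M[i] + Masas_AA[letras]
--
--     Lineal_Espectro = [0]
--
--     for i in range(len(Prefijo_M)):
--         for j in range(i+1, len(Prefijo_M)):
--             Lineal_Espectro.append(Prefijo_M[j]-Prefijo_M[i])
--
--     return sorted(Lineal_Espectro)
--
-- def PuntuacionLP(Peptido, Espectro):
--     linearSpectrum = EspectroLineal(Peptido)
--     puntuacion = 0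
--
--     for masa in Espectro:
--         if masa in linearSpectrum:
--             puntuacion +=1
--             linearSpectrum.remove(masa)
--
--     return puntuacion
-- ===== SOURCE B (Python) =====
-- Masas_AA = {'G': 57, 'A': 71, 'S': 87, 'P': 97, 'V': 99, 'T': 101, 'C': 103, 'I': 113, 'L': 113, 'N': 114, 'D': 115, 'K': 128, 'Q': 128, 'E': 129, 'M': 131, 'H': 137, 'F': 147, 'R': 156, 'Y': 163, 'W': 186}
--
-- def PuntuacionLP(Peptido, Espectro):
--     n = len(Peptido)
--     spectrum = [0]
--     for i in range(n):
--         total = 0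
--         for j in range(i, n):
--             total += Masas_AA[Peptido[j]]
--             spectrum.append(total)
--     counts = {}
--     for m in spectrum:
--         counts[m] = counts.get(m, 0) + 1
--     score = 0
--     for masa in Espectro:
--         if counts.get(masa, 0) > 0:
--             counts[masa] = counts[masa] - 1
--             score += 1
--     return score
-- ===== Notes on version B (the rewrite author's own statement) =====
-- stated objective: alternative
-- what changed: B builds the linear spectrum by direct nested running sums (no prefix-mass dict, no pairwise-difference pass, no sorting) and scores with a count dictionary built once, instead of A's sorted-list membership test plus list.remove scan per spectrum mass.
-- outside the precondition, e.g. on PuntuacionLP('Gx', [57]): A returns 1, B raises KeyError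
import Mathlib
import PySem

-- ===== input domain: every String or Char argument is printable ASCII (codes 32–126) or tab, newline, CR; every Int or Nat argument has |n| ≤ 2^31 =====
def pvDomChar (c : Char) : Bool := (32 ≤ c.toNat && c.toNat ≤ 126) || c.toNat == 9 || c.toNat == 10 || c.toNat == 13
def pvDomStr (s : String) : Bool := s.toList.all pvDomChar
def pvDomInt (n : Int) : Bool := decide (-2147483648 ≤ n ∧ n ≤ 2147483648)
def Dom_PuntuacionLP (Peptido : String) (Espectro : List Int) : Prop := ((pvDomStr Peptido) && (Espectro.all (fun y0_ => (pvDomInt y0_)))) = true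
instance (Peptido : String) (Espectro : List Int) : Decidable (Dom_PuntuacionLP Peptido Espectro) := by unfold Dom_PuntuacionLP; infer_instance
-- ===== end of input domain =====

-- B replaces A's prefix-mass dict + pairwise-difference + sort + list.remove scoring by
-- direct nested running sums and a count dictionary (objective: alternative decomposition).

-- ===== PORT A =====
def pvLetras : List Char :=
  ['G', 'A', 'S', 'P', 'V', 'T', 'C', 'I', 'L', 'N', 'D', 'K', 'Q', 'E', 'M', 'H', 'F', 'R', 'Y', 'W']

def pvMasas : PySem.Dict Char Int := PySem.Dict.ofList
  [('G', 57), ('A', 71), ('S', 87), ('P', 97), ('V', 99), ('T', 101), ('C', 103), ('I', 113),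
   ('L', 113), ('N', 114), ('D', 115), ('K', 128), ('Q', 128), ('E', 129), ('M', 131),
   ('H', 137), ('F', 147), ('R', 156), ('Y', 163), ('W', 186)]

-- Literal port of EspectroLineal.  Prefijo_M[i] raises KeyError in Python when an earlier
-- residue was not recognised; that case is excluded by Pre_ (getD 0 used in its place).
def pvEspectroLineal (cs : List Char) : List Int :=
  let pref : PySem.Dict Int Int :=
    (PySem.List.pyRange 0 (cs.length : Int) 1).foldl (fun d i =>
      pvLetras.foldl (fun d letras =>
        if letras = PySem.List.pyGetD cs i ' ' then
          d.insert (i + 1) (d.getD i 0 + pvMasas.getD letras 0)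
        else d) d)
      (PySem.Dict.empty.insert 0 0)
  let lineal : List Int :=
    (PySem.List.pyRange 0 (pref.size : Int) 1).foldl (fun acc i =>
      (PySem.List.pyRange (i + 1) (pref.size : Int) 1).foldl (fun acc j =>
        acc ++ [pref.getD j 0 - pref.getD i 0]) acc) [0]
  PySem.List.sorted lineal (fun x => x) false

def PuntuacionLP (Peptido : String) (Espectro : List Int) : Int :=
  let linearSpectrum := pvEspectroLineal Peptido.toList
  (Espectro.foldl (fun (st : Int × List Int) masa =>
      if st.2.contains masa then (st.1 + 1, (PySem.List.remove? st.2 masa).getD st.2) else st)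
    (0, linearSpectrum)).1

-- ===== PORT B =====
-- Masas_AA[Peptido[j]] raises KeyError in Python on an unrecognised residue; that case is
-- excluded by Pre_ (getD 0 used in its place).
def PuntuacionLP_alt (Peptido : String) (Espectro : List Int) : Int :=
  let cs := Peptido.toList
  let n := cs.length
  let spectrum : List Int :=
    (PySem.List.pyRange 0 (n : Int) 1).foldl (fun sp i =>
      ((PySem.List.pyRange i (n : Int) 1).foldl (fun (st : List Int × Int) j =>
          let total := st.2 + pvMasas.getD (PySem.List.pyGetD cs j ' ') 0
          (st.1 ++ [total], total)) (sp, 0)).1) [0]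
  let counts : PySem.Dict Int Int :=
    spectrum.foldl (fun d m => d.insert m (d.getD m 0 + 1)) PySem.Dict.empty
  (Espectro.foldl (fun (st : Int × PySem.Dict Int Int) masa =>
      if st.2.getD masa 0 > 0 then (st.1 + 1, st.2.insert masa (st.2.getD masa 0 - 1)) else st)
    (0, counts)).1

-- ===== PRECONDITION & SPEC =====
-- Pre_ excludes peptides containing a residue outside the 20-letter amino-acid alphabet:
-- B raises KeyError on any such residue, and A raises KeyError too unless the invalid
-- residues form a suffix of the peptide (there A silently scores only the valid prefix).
def Pre_PuntuacionLP (Peptido : String) (Espectro : List Int) : Prop :=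
  (Peptido.toList.all (fun c => pvLetras.contains c)) = true
instance (Peptido : String) (Espectro : List Int) : Decidable (Pre_PuntuacionLP Peptido Espectro) := by
  unfold Pre_PuntuacionLP; infer_instance

def pvWitness_PuntuacionLP : String × List Int := ("GA", [57, 71, 128])

def Spec_PuntuacionLP (Peptido : String) (Espectro : List Int) (out : Int) : Prop := out = PuntuacionLP_alt Peptido Espectro
instance (Peptido : String) (Espectro : List Int) (out : Int) : Decidable (Spec_PuntuacionLP Peptido Espectro out) := by unfold Spec_PuntuacionLP; infer_instance

-- ===== CLAIM (what is proved, stated in full; the proofs are below) =====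
def Claim_equal_PuntuacionLP : Prop := ∀ (Peptido : String) (Espectro : List Int), Dom_PuntuacionLP Peptido Espectro → Pre_PuntuacionLP Peptido Espectro → Spec_PuntuacionLP Peptido Espectro (PuntuacionLP Peptido Espectro)

-- ===== LEMMAS AND PROOFS =====

-- mass of one residue and prefix mass of the first k residues
def pvMass (c : Char) : Int := pvMasas.getD c 0
def pvP (cs : List Char) (k : Nat) : Int := ((cs.take k).map pvMass).sum

-- the prefix-mass dict built by A's first loop, as a function of how many residues are read
def pvPrefD (cs : List Char) (t : Nat) : PySem.Dict Int Int :=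
  (PySem.List.pyRange 0 (t : Int) 1).foldl (fun d i =>
    pvLetras.foldl (fun d letras =>
      if letras = PySem.List.pyGetD cs i ' ' then
        d.insert (i + 1) (d.getD i 0 + pvMasas.getD letras 0)
      else d) d)
    (PySem.Dict.empty.insert 0 0)

-- [0] plus every difference pvP j - pvP i, 0 ≤ i < j ≤ n: the linear spectrum, unsorted
def pvSpecList (cs : List Char) : List Int :=
  [0] ++ (PySem.List.pyRange 0 (cs.length : Int) 1).flatMap (fun i =>
    (PySem.List.pyRange (i + 1) ((cs.length : Int) + 1) 1).map
      (fun j => pvP cs j.toNat - pvP cs i.toNat))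

lemma pvP_succ (cs : List Char) (t : Nat) (ht : t < cs.length) :
    pvP cs (t + 1) = pvP cs t + pvMass cs[t] := by
  unfold pvP
  rw [List.map_take, List.map_take,
      List.sum_take_succ (cs.map pvMass) t (by simpa using ht), List.getElem_map]

-- the inner 'for letras in Letras' loop, for a recognised residue c
lemma pvLetras_fold (c : Char) (hc : c ∈ pvLetras) (d : PySem.Dict Int Int) (i : Int) :
    pvLetras.foldl (fun d letras =>
      if letras = c then d.insert (i + 1) (d.getD i 0 + pvMasas.getD letras 0) else d) d
    = d.insert (i + 1) (d.getD i 0 + pvMass c) := by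
  fin_cases hc <;> rfl

-- the prefix-mass dict after reading t residues: items are (k, pvP cs k) for k = 0..t
lemma pvPref_items (cs : List Char) (hv : ∀ c ∈ cs, c ∈ pvLetras) :
    ∀ t, t ≤ cs.length →
    (pvPrefD cs t).items = (List.range (t + 1)).map (fun (k : Nat) => ((k : Int), pvP cs k)) := by
  intro t
  induction t with
  | zero => intro _; rfl
  | succ t ih =>
    intro ht
    have ht' : t ≤ cs.length := Nat.le_of_succ_le ht
    have hlt : t < cs.length := ht
    have hc : cs[t] ∈ pvLetras := hv _ (cs.getElem_mem hlt)
    have hget : PySem.List.pyGetD cs (t : Int) ' ' = cs[t] := by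
      rw [PySem.List.pyGetD_natCast, List.getD_eq_getElem?_getD, List.getElem?_eq_getElem hlt]
      rfl
    have hkeys : (pvPrefD cs t).keys = (List.range (t + 1)).map (fun (k : Nat) => (k : Int)) := by
      show (pvPrefD cs t).items.map (·.1) = _
      rw [ih ht', List.map_map]; rfl
    have hnodup : (pvPrefD cs t).keys.Nodup := by
      rw [hkeys]
      exact (List.nodup_range).map (fun a b h => by exact_mod_cast h)
    have hnc : (pvPrefD cs t).contains ((t : Int) + 1) = false := by
      rw [PySem.Dict.contains_eq_decide_mem_keys, hkeys, decide_eq_false_iff_not]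
      intro hmem
      rcases List.mem_map.mp hmem with ⟨k, hk, hke⟩
      have : k < t + 1 := List.mem_range.mp hk
      omega
    have hgd : (pvPrefD cs t).getD (t : Int) 0 = pvP cs t := by
      apply PySem.Dict.getD_of_mem_items (d := pvPrefD cs t) _ hnodup
      rw [ih ht']
      exact List.mem_map.mpr ⟨t, List.mem_range.mpr (by omega), rfl⟩
    have hstep : pvPrefD cs (t + 1)
        = (pvPrefD cs t).insert ((t : Int) + 1) ((pvPrefD cs t).getD (t : Int) 0 + pvMass cs[t]) := by
      unfold pvPrefD
      rw [show ((t + 1 : Nat) : Int) = (t : Int) + 1 by push_cast; ring,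
          PySem.List.pyRange_one_succ_right (by positivity), List.foldl_append]
      simp only [List.foldl_cons, List.foldl_nil]
      rw [hget, pvLetras_fold cs[t] hc]
    rw [hstep, PySem.Dict.items_insert_of_not_contains _ _ hnc, ih ht', hgd,
        List.range_succ (n := t + 1), List.map_append]
    simp only [List.map_cons, List.map_nil]
    rw [pvP_succ cs t hlt]
    push_cast
    rfl

lemma pvPref_nodup (cs : List Char) (hv : ∀ c ∈ cs, c ∈ pvLetras) (t : Nat) (ht : t ≤ cs.length) :
    (pvPrefD cs t).keys.Nodup := by
  have : (pvPrefD cs t).keys = (List.range (t + 1)).map (fun (k : Nat) => (k : Int)) := by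
    show (pvPrefD cs t).items.map (·.1) = _
    rw [pvPref_items cs hv t ht, List.map_map]; rfl
  rw [this]
  exact (List.nodup_range).map (fun a b h => by exact_mod_cast h)

lemma pvPref_getD (cs : List Char) (hv : ∀ c ∈ cs, c ∈ pvLetras) (t : Nat) (ht : t ≤ cs.length)
    (j : Int) (h0 : 0 ≤ j) (hj : j ≤ t) :
    (pvPrefD cs t).getD j 0 = pvP cs j.toNat := by
  apply PySem.Dict.getD_of_mem_items (d := pvPrefD cs t) _ (pvPref_nodup cs hv t ht)
  rw [pvPref_items cs hv t ht]
  refine List.mem_map.mpr ⟨j.toNat, List.mem_range.mpr (by omega), ?_⟩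
  rw [Int.toNat_of_nonneg h0]

lemma pvPref_size (cs : List Char) (hv : ∀ c ∈ cs, c ∈ pvLetras) :
    (pvPrefD cs cs.length).size = cs.length + 1 := by
  show (pvPrefD cs cs.length).items.length = _
  rw [pvPref_items cs hv cs.length le_rfl, List.length_map, List.length_range]

-- B's inner running-sum loop yields the differences pvP j - base for j = j0+1 .. n
lemma pvB_inner (cs : List Char) (base : Int) :
    ∀ (t j0 : Nat) (sp : List Int), j0 + t = cs.length →
    ((PySem.List.pyRange (j0 : Int) (cs.length : Int) 1).foldl (fun (st : List Int × Int) j =>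
        let total := st.2 + pvMasas.getD (PySem.List.pyGetD cs j ' ') 0
        (st.1 ++ [total], total)) (sp, pvP cs j0 - base)).1
    = sp ++ (PySem.List.pyRange ((j0 : Int) + 1) ((cs.length : Int) + 1) 1).map
        (fun j => pvP cs j.toNat - base) := by
  intro t
  induction t with
  | zero =>
    intro j0 sp h
    rw [PySem.List.pyRange_one_eq_nil (by omega), PySem.List.pyRange_one_eq_nil (by omega)]
    simp
  | succ t ih =>
    intro j0 sp h
    have hlt : j0 < cs.length := by omega
    have hget : PySem.List.pyGetD cs (j0 : Int) ' ' = cs[j0] := by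
      rw [PySem.List.pyGetD_natCast, List.getD_eq_getElem?_getD, List.getElem?_eq_getElem hlt]
      rfl
    rw [PySem.List.pyRange_one_cons (by exact_mod_cast hlt), List.foldl_cons]
    simp only []
    rw [hget]
    have htot : pvP cs j0 - base + pvMass cs[j0] = pvP cs (j0 + 1) - base := by
      rw [pvP_succ cs j0 hlt]; ring
    have hrw : (sp ++ [pvP cs j0 - base + pvMass cs[j0]], pvP cs j0 - base + pvMass cs[j0])
        = (sp ++ [pvP cs (j0 + 1) - base], pvP cs (j0 + 1) - base) := by rw [htot]
    show ((PySem.List.pyRange ((j0 : Int) + 1) (cs.length : Int) 1).foldl _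
        (sp ++ [pvP cs j0 - base + pvMass cs[j0]], pvP cs j0 - base + pvMass cs[j0])).1 = _
    rw [hrw, show ((j0 : Int) + 1) = ((j0 + 1 : Nat) : Int) by push_cast; ring,
        ih (j0 + 1) (sp ++ [pvP cs (j0 + 1) - base]) (by omega)]
    rw [PySem.List.pyRange_one_cons (a := ((j0 + 1 : Nat) : Int)) (b := (cs.length : Int) + 1)
        (by push_cast; omega)]
    rw [List.map_cons, List.append_assoc]
    simp

-- B's spectrum-building double loop produces pvSpecList
lemma pvB_spectrum (cs : List Char) :
    (PySem.List.pyRange 0 (cs.length : Int) 1).foldl (fun sp i =>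
      ((PySem.List.pyRange i (cs.length : Int) 1).foldl (fun (st : List Int × Int) j =>
          let total := st.2 + pvMasas.getD (PySem.List.pyGetD cs j ' ') 0
          (st.1 ++ [total], total)) (sp, 0)).1) [0]
    = pvSpecList cs := by
  rw [PySem.List.foldl_congr_mem _ _ (fun sp i =>
      sp ++ (PySem.List.pyRange (i + 1) ((cs.length : Int) + 1) 1).map
        (fun j => pvP cs j.toNat - pvP cs i.toNat)) _ ?_]
  · exact PySem.List.foldl_append_eq_flatMap _ _ _
  · intro sp i hi
    rcases PySem.List.mem_pyRange_one.mp hi with ⟨h0, hn⟩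
    have hi' : i = ((i.toNat : Nat) : Int) := by omega
    rw [hi']
    have h2 := pvB_inner cs (pvP cs i.toNat) (cs.length - i.toNat) i.toNat sp (by omega)
    rw [sub_self] at h2
    exact h2

-- A's pairwise-difference double loop (before sorting) also produces pvSpecList
lemma pvA_lineal (cs : List Char) (hv : ∀ c ∈ cs, c ∈ pvLetras) :
    (PySem.List.pyRange 0 ((pvPrefD cs cs.length).size : Int) 1).foldl (fun acc i =>
      (PySem.List.pyRange (i + 1) ((pvPrefD cs cs.length).size : Int) 1).foldl (fun acc j =>
        acc ++ [(pvPrefD cs cs.length).getD j 0 - (pvPrefD cs cs.length).getD i 0]) acc) [0]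
    = pvSpecList cs := by
  rw [pvPref_size cs hv,
      show ((cs.length + 1 : Nat) : Int) = (cs.length : Int) + 1 by push_cast; ring]
  rw [PySem.List.foldl_congr_mem _ _ (fun acc i =>
      acc ++ (PySem.List.pyRange (i + 1) ((cs.length : Int) + 1) 1).map
        (fun j => pvP cs j.toNat - pvP cs i.toNat)) _ ?_]
  · rw [PySem.List.foldl_append_eq_flatMap]
    unfold pvSpecList
    congr 1
    rw [PySem.List.pyRange_one_succ_right (by positivity), List.flatMap_append]
    have hnil : List.flatMap (fun i =>
        (PySem.List.pyRange (i + 1) ((cs.length : Int) + 1) 1).map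
          (fun j => pvP cs j.toNat - pvP cs i.toNat)) [(cs.length : Int)] = [] := by
      simp [PySem.List.pyRange_one_eq_nil
        (le_refl ((cs.length : Int) + 1))]
    rw [hnil, List.append_nil]
  · intro acc i hi
    rcases PySem.List.mem_pyRange_one.mp hi with ⟨h0, hn⟩
    beta_reduce
    rw [PySem.List.foldl_append_singleton_eq_map]
    congr 1
    apply List.map_congr_left
    intro j hj
    rcases PySem.List.mem_pyRange_one.mp hj with ⟨hj0, hjn⟩
    rw [pvPref_getD cs hv cs.length le_rfl j (by omega) (by omega),
        pvPref_getD cs hv cs.length le_rfl i (by omega) (by omega)]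

-- greedy list-remove scoring equals counter-decrement scoring
lemma pvScore_eq (E : List Int) : ∀ (L : List Int) (d : PySem.Dict Int Int) (s : Int),
    (∀ m, d.getD m 0 = (L.count m : Int)) →
    (E.foldl (fun (st : Int × List Int) masa =>
        if st.2.contains masa then (st.1 + 1, (PySem.List.remove? st.2 masa).getD st.2) else st)
      (s, L)).1
    = (E.foldl (fun (st : Int × PySem.Dict Int Int) masa =>
        if st.2.getD masa 0 > 0 then (st.1 + 1, st.2.insert masa (st.2.getD masa 0 - 1)) else st)
      (s, d)).1 := by
  induction E with
  | nil => intro L d s h; rfl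
  | cons masa E ih =>
    intro L d s h
    simp only [List.foldl_cons]
    by_cases hm : masa ∈ L
    · have hcnt : 0 < L.count masa := List.count_pos_iff.mpr hm
      rw [if_pos (List.contains_iff_mem.mpr hm), if_pos (by rw [h masa]; exact_mod_cast hcnt),
          PySem.List.remove?_eq_some_erase L masa hm, Option.getD_some]
      apply ih
      intro m
      rw [PySem.Dict.getD_insert]
      by_cases hme : m = masa
      · subst hme
        rw [if_pos rfl, h m, List.count_erase_self]
        have := hcnt; push_cast [Nat.cast_sub (by omega : 1 ≤ L.count m)]; ring
      · rw [if_neg hme, h m, List.count_erase_of_ne hme]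
    · have hcnt : L.count masa = 0 := List.count_eq_zero.mpr hm
      rw [if_neg (by simp [hm]), if_neg (by rw [h masa, hcnt]; simp)]
      exact ih L d s h

-- ===== VERDICT (by name: the statement is the Claim_ definition above) =====
theorem PuntuacionLP_spec : Claim_equal_PuntuacionLP := by
  intro Peptido Espectro _ hpre
  unfold Spec_PuntuacionLP
  have hv : ∀ c ∈ Peptido.toList, c ∈ pvLetras := by
    intro c hc
    have := List.all_eq_true.mp hpre c hc
    exact List.contains_iff_mem.mp this
  have hA := pvA_lineal Peptido.toList hv
  have hB := pvB_spectrum Peptido.toList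
  unfold pvPrefD at hA
  unfold PuntuacionLP PuntuacionLP_alt pvEspectroLineal
  simp only []
  rw [hA, hB, PySem.Dict.foldl_insert_getD_add_one_eq_counter]
  apply pvScore_eq
  intro m
  rw [PySem.Dict.getD_counter]
  congr 1
  exact ((PySem.List.sorted_perm (pvSpecList Peptido.toList) (fun x => x) false).count_eq m).symm
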